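-- pv_equiv track=rewrite | github.com/mikulatomas/fcapsy-experiments | fcapy_experiments/typicality/top_k_similarity.py | k_values_or_until_differs
-- ===== SOURCE A (Python) =====
-- def k_values_or_until_differs(iterator, k):
--     max_idx = len(iterator) - 1
--
--     if k == 0:
--         return []
--
--     for idx in range(len(iterator)):
--         if idx + 1 < k or (idx < max_idx and iterator[idx] == iterator[idx + 1]):
--             yield iterator[idx]
--         else:
--             yield iterator[idx]
--             break
-- ===== SOURCE B (Python) =====
-- def k_values_or_until_differs(iterator, k):
--     if k == 0:
--         return
--     n = min(max(k, 1), len(iterator))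
--     while n < len(iterator) and iterator[n - 1] == iterator[n]:
--         n += 1
--     for i in range(n):
--         yield iterator[i]
-- ===== Notes on version B (the rewrite author's own statement) =====
-- stated objective: alternative
-- what changed: B first computes the count n of elements to emit (k clamped to [1,len], then extended through the run of equal elements by comparing each element with its predecessor) and emits the prefix of length n in a second pass, instead of A's single loop that interleaves yielding with a look-ahead comparison and a break.
import Mathlib
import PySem

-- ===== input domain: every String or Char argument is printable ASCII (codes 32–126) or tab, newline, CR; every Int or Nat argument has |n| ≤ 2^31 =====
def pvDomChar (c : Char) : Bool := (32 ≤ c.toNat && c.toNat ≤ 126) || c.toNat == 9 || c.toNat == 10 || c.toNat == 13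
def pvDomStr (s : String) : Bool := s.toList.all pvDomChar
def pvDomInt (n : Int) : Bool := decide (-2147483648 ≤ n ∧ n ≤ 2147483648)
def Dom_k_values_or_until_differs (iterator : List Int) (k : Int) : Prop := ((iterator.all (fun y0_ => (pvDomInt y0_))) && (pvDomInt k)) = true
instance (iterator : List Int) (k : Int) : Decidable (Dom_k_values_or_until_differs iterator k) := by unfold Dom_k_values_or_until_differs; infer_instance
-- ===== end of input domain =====

-- B computes the emit count first (clamped k extended through the equal run by predecessor
-- comparison), then emits that prefix in a second pass — an alternative decomposition of A's
-- single yield-and-break loop; same O(n) cost. Both Pythons are generators; equivalence is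
-- about the produced sequence of values.


-- ===== PORT A =====
-- loop body of A: iterate over the remaining indices; on the break-branch emit the element and stop
def kvGoA (it : List Int) (k maxIdx : Int) : List Nat → List Int
  | [] => []
  | idx :: rest =>
    if ((idx : Int) + 1 < k) ∨ ((idx : Int) < maxIdx ∧ it.getD idx 0 = it.getD (idx + 1) 0) then
      it.getD idx 0 :: kvGoA it k maxIdx rest
    else
      [it.getD idx 0]

def k_values_or_until_differs (iterator : List Int) (k : Int) : List Int :=
  let maxIdx : Int := (iterator.length : Int) - 1
  if k = 0 then []
  else kvGoA iterator k maxIdx (List.range iterator.length)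

-- ===== PORT B =====
-- B's while loop: fuel-guarded transcription of `while n < len and it[n-1] == it[n]: n += 1`
def kvExt (it : List Int) : Nat → Nat → Nat
  | 0, n => n
  | fuel + 1, n =>
    if n < it.length ∧ it.getD (n - 1) 0 = it.getD n 0 then kvExt it fuel (n + 1) else n

def k_values_or_until_differs_alt (iterator : List Int) (k : Int) : List Int :=
  if k = 0 then []
  else
    let n0 : Nat := min (max k 1).toNat iterator.length
    let n : Nat := kvExt iterator (iterator.length - n0) n0
    (List.range n).map (fun i => iterator.getD i 0)

-- ===== PRECONDITION & SPEC =====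
def Spec_k_values_or_until_differs (iterator : List Int) (k : Int) (out : List Int) : Prop := out = k_values_or_until_differs_alt iterator k
instance (iterator : List Int) (k : Int) (out : List Int) : Decidable (Spec_k_values_or_until_differs iterator k out) := by unfold Spec_k_values_or_until_differs; infer_instance

-- ===== CLAIM (what is proved, stated in full; the proofs are below) =====
def Claim_equal_k_values_or_until_differs : Prop := ∀ (iterator : List Int) (k : Int), Dom_k_values_or_until_differs iterator k → Spec_k_values_or_until_differs iterator k (k_values_or_until_differs iterator k)

-- ===== LEMMAS AND PROOFS =====

-- the final n produced by kvExt: bounds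
theorem kvExt_ge (it : List Int) : ∀ fuel n, n ≤ kvExt it fuel n := by
  intro fuel
  induction fuel with
  | zero => intro n; simp [kvExt]
  | succ f ih =>
    intro n
    simp only [kvExt]
    split
    · exact le_trans (Nat.le_succ n) (ih (n + 1))
    · exact le_refl n

theorem kvExt_le (it : List Int) : ∀ fuel n, n ≤ it.length → kvExt it fuel n ≤ it.length := by
  intro fuel
  induction fuel with
  | zero => intro n h; simpa [kvExt] using h
  | succ f ih =>
    intro n h
    simp only [kvExt]
    split
    · next hc => exact ih (n + 1) hc.1
    · exact h

-- every position strictly between the start and the final n satisfies the loop condition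
theorem kvExt_run (it : List Int) : ∀ fuel n m, n ≤ m → m < kvExt it fuel n →
    m < it.length ∧ it.getD (m - 1) 0 = it.getD m 0 := by
  intro fuel
  induction fuel with
  | zero => intro n m h1 h2; simp [kvExt] at h2; omega
  | succ f ih =>
    intro n m h1 h2
    simp only [kvExt] at h2
    split at h2
    · next hc =>
      rcases Nat.eq_or_lt_of_le h1 with rfl | hlt
      · exact hc
      · exact ih (n + 1) m hlt h2
    · omega

-- at the final n the loop condition fails (given enough fuel)
theorem kvExt_stop (it : List Int) : ∀ fuel n, it.length ≤ n + fuel →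
    ¬ (kvExt it fuel n < it.length ∧ it.getD (kvExt it fuel n - 1) 0 = it.getD (kvExt it fuel n) 0) := by
  intro fuel
  induction fuel with
  | zero => intro n h hc; simp [kvExt] at hc; omega
  | succ f ih =>
    intro n h
    simp only [kvExt]
    split
    · exact ih (n + 1) (by omega)
    · next hc => exact hc

-- B's emitted list is a prefix of the input
theorem kvMap_range_take (it : List Int) (n : Nat) (h : n ≤ it.length) :
    (List.range n).map (fun i => it.getD i 0) = it.take n := by
  apply List.ext_getElem
  · simp [h]
  · intro i h1 h2
    simp only [List.getElem_map, List.getElem_range, List.getElem_take]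
    rw [List.getD_eq_getElem]

-- main invariant: from any index j still below the final count N, A's loop emits exactly
-- the elements of positions j..N-1
theorem kvGoA_take (it : List Int) (k : Int) (N : Nat)
    (hN : N ≤ it.length)
    (hK : ∀ m : Nat, m < it.length → (m : Int) < k → m < N)
    (hrun : ∀ m : Nat, 0 < m → ¬ ((m : Int) < k) → m < N → m < it.length ∧ it.getD (m - 1) 0 = it.getD m 0)
    (hstop : ¬ (N < it.length ∧ it.getD (N - 1) 0 = it.getD N 0)) :
    ∀ d j, j + d = it.length → j < N →
      kvGoA it k ((it.length : Int) - 1) (List.range' j d) = (it.drop j).take (N - j) := by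
  intro d
  induction d with
  | zero => intro j h1 h2; omega
  | succ d ih =>
    intro j h1 h2
    rw [List.range'_succ]
    simp only [kvGoA]
    have hjlen : j < it.length := by omega
    have hdrop : it.drop j = it[j] :: it.drop (j + 1) := List.drop_eq_getElem_cons hjlen
    have hgj : it.getD j 0 = it[j] := List.getD_eq_getElem it 0 hjlen
    by_cases hNj : j + 1 < N
    · -- the loop condition holds at j
      have hcond : ((j : Int) + 1 < k) ∨ ((j : Int) < (it.length : Int) - 1 ∧ it.getD j 0 = it.getD (j + 1) 0) := by
        by_cases hkj : ((j : Int) + 1 < k)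
        · exact Or.inl hkj
        · have := hrun (j + 1) (by omega) (by push_cast; omega) hNj
          right
          refine ⟨by omega, ?_⟩
          simpa using this.2
      rw [if_pos hcond]
      have hd : d + (j + 1) = it.length := by omega
      rw [ih (j + 1) (by omega) hNj]
      rw [hdrop, hgj]
      have : N - j = (N - (j + 1)) + 1 := by omega
      rw [this, List.take_succ_cons]
    · -- j = N - 1: the loop condition fails (or it is the last index): emit j and stop
      have hjN : j = N - 1 := by omega
      by_cases hlast : j + 1 < it.length
      · have hcond : ¬ (((j : Int) + 1 < k) ∨ ((j : Int) < (it.length : Int) - 1 ∧ it.getD j 0 = it.getD (j + 1) 0)) := by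
          rintro (hk | ⟨hlt, heq⟩)
          · have := hK (j + 1) hlast (by push_cast; omega)
            omega
          · apply hstop
            have hN' : N = j + 1 := by omega
            refine ⟨by omega, ?_⟩
            rw [hN']
            simpa using heq
        rw [if_neg hcond]
        have : N - j = 1 := by omega
        rw [this, hdrop, List.take_succ_cons, List.take_zero, hgj]
      · -- j is the last index: both branches of kvGoA yield the singleton
        have hd0 : d = 0 := by omega
        subst hd0
        have : N - j = 1 := by omega
        rw [this, hdrop, List.take_succ_cons, List.take_zero, hgj]
        split <;> simp [kvGoA]

theorem kv_equiv (it : List Int) (k : Int) :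
    k_values_or_until_differs it k = k_values_or_until_differs_alt it k := by
  unfold k_values_or_until_differs k_values_or_until_differs_alt
  by_cases hk : k = 0
  · simp [hk]
  · simp only [if_neg hk]
    set n0 : Nat := min (max k 1).toNat it.length with hn0
    set N : Nat := kvExt it (it.length - n0) n0 with hNdef
    have hn0le : n0 ≤ it.length := by omega
    have hNle : N ≤ it.length := kvExt_le it _ n0 hn0le
    have hNge : n0 ≤ N := kvExt_ge it _ n0
    rw [kvMap_range_take it N hNle]
    by_cases hlen : it.length = 0
    · rw [List.eq_nil_iff_length_eq_zero.mpr hlen]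
      simp [kvGoA]
    · have hn0pos : 1 ≤ n0 := by
        have : 1 ≤ (max k 1).toNat := by
          have := le_max_right k 1
          omega
        omega
      have hK : ∀ m : Nat, m < it.length → (m : Int) < k → m < N := by
        intro m hmlen hm
        have hkm : (max k 1).toNat > m := by omega
        omega
      have hrun : ∀ m : Nat, 0 < m → ¬ ((m : Int) < k) → m < N → m < it.length ∧ it.getD (m - 1) 0 = it.getD m 0 := by
        intro m hm0 hmk hmN
        have hmk' : k ≤ (m : Int) := not_lt.mp hmk
        have hm : n0 ≤ m := by omega
        exact kvExt_run it _ n0 m hm hmN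
      have hstop : ¬ (N < it.length ∧ it.getD (N - 1) 0 = it.getD N 0) :=
        kvExt_stop it _ n0 (by omega)
      have := kvGoA_take it k N hNle hK hrun hstop it.length 0 (by omega) (by omega)
      rw [List.range_eq_range']
      rw [this]
      simp

-- ===== VERDICT (by name: the statement is the Claim_ definition above) =====
theorem k_values_or_until_differs_spec : Claim_equal_k_values_or_until_differs := by
  intro it k _
  exact kv_equiv it k
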